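-- pv_equiv track=rewrite | github.com/birc-gsa-2022/ba-python-marse00 | src/ba.py | strict_border_array
-- ===== SOURCE A (Python) =====
-- def border_array(x: str) -> list[int]:
--     """
--     Construct the border array for x.
--
--     >>> border_array("aaba")
--     [0, 1, 0, 1]
--     >>> border_array("ississippi")
--     [0, 0, 0, 1, 2, 3, 4, 0, 0, 1]
--     >>> border_array("")
--     []
--     """
--     i, j = 0, 1
--     ba = [0 for k in range(len(x))]
--     while j < len(x):
--         if x[i] == x[j]:
--             ba[j] = ba[j-1] + 1
--             i += 1
--         else:
--             i = 0
--         j += 1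
--
--     return ba  # FIXME
--
-- def strict_border_array(x: str) -> list[int]:
--     """
--     Construct the strict border array for x.
--
--     A struct border array is one where the border cannot
--     match on the next character. If b is the length of the
--     longest border for x[:i+1], it means x[:b] == x[i-b:i+1],
--     but for a strict border, it must be the longest border
--     such that x[b] != x[i+1].
--
--     >>> strict_border_array("aaba")
--     [0, 1, 0, 1]
--     >>> strict_border_array("aaaba")
--     [0, 0, 2, 0, 1]
--     >>> strict_border_array("ississippi")
--     [0, 0, 0, 0, 0, 0, 4, 0, 0, 1]
--     >>> strict_border_array("")
--     []
--     """
--     ba = border_array(x)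
--     for i in range(len(ba)):
--         if i == 0:
--             continue
--         if ba[i] != 0:
--             ba[i-1] = 0
--     return ba  # FIXME
-- ===== SOURCE B (Python) =====
-- def strict_border_array(x: str) -> list[int]:
--     # Single fused pass: compute the (naive) border value and apply the
--     # strict zeroing of the previous entry immediately, appending to the
--     # output instead of mutating a preallocated array in two passes.
--     out = [0] if x else []
--     i = 0
--     for j in range(1, len(x)):
--         if x[i] == x[j]:
--             v = out[-1] + 1
--             out[-1] = 0
--             out.append(v)
--             i += 1
--         else:
--             i = 0
--             out.append(0)
--     return out
-- ===== Notes on version B (the rewrite author's own statement) =====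
-- stated objective: faster
-- what changed: B fuses A's two passes (the border_array helper loop plus the separate strict zeroing pass over a preallocated mutable array) into a single appending pass that zeroes the previous entry immediately on a match, eliminating the helper and the second traversal.
import Mathlib
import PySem

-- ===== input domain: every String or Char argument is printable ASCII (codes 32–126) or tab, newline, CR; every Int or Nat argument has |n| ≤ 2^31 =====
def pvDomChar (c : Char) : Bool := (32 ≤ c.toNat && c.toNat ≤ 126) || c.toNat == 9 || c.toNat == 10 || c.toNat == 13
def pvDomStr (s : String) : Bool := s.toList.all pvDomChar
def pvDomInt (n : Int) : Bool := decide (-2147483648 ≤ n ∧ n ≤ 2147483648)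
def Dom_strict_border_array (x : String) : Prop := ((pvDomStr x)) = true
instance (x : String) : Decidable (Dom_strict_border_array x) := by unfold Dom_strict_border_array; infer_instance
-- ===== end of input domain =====

-- B fuses A's two passes (naive border loop + strict zeroing pass) into one
-- appending pass with no helper function; objective: alternative decomposition.

-- ===== PORT A =====
-- while-loop of border_array; x[i]/x[j]/ba[j-1] are always in range in A, ported with getD
def pvA_baLoop (s : List Char) (i j : Nat) (ba : List Int) : List Int :=
  if j < s.length then
    if s.getD i ' ' = s.getD j ' ' then
      pvA_baLoop s (i + 1) (j + 1) (ba.set j (ba.getD (j - 1) 0 + 1))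
    else
      pvA_baLoop s 0 (j + 1) ba
  else ba
termination_by s.length - j

def pvA_border_array (x : String) : List Int :=
  pvA_baLoop x.toList 0 1 (List.replicate x.toList.length 0)

-- one step of the strict post-pass ('continue' on i = 0)
def pvA_strictStep (b : List Int) (i : Nat) : List Int :=
  if i = 0 then b else if b.getD i 0 ≠ 0 then b.set (i - 1) 0 else b

def strict_border_array (x : String) : List Int :=
  let ba := pvA_border_array x
  (List.range ba.length).foldl pvA_strictStep ba

-- ===== PORT B =====
-- fused loop of Source B; out[-1] is always the last element (out nonempty whenever read)
def pvB_loop (s : List Char) (i j : Nat) (out : List Int) : List Int :=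
  if j < s.length then
    if s.getD i ' ' = s.getD j ' ' then
      pvB_loop s (i + 1) (j + 1) ((out.set (out.length - 1) 0) ++ [out.getLastD 0 + 1])
    else
      pvB_loop s 0 (j + 1) (out ++ [0])
  else out
termination_by s.length - j

def strict_border_array_alt (x : String) : List Int :=
  pvB_loop x.toList 0 1 (if x.toList.isEmpty then [] else [0])

-- ===== PRECONDITION & SPEC =====
def Spec_strict_border_array (x : String) (out : List Int) : Prop := out = strict_border_array_alt x
instance (x : String) (out : List Int) : Decidable (Spec_strict_border_array x out) := by unfold Spec_strict_border_array; infer_instance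

-- ===== CLAIM (what is proved, stated in full; the proofs are below) =====
def Claim_equal_strict_border_array : Prop := ∀ (x : String), Dom_strict_border_array x → Spec_strict_border_array x (strict_border_array x)

-- ===== LEMMAS AND PROOFS =====

-- the naive border values at positions j..n-1 given the previous value
def pvNaive (s : List Char) (i j : Nat) (prev : Int) : List Int :=
  if j < s.length then
    if s.getD i ' ' = s.getD j ' ' then (prev + 1) :: pvNaive s (i + 1) (j + 1) (prev + 1)
    else 0 :: pvNaive s 0 (j + 1) 0
  else []
termination_by s.length - j

-- zero every element whose successor is nonzero
def pvZnext : List Int → List Int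
  | [] => []
  | [a] => [a]
  | a :: b :: t => (if b ≠ 0 then 0 else a) :: pvZnext (b :: t)

theorem pvZnext_length (l : List Int) : (pvZnext l).length = l.length := by
  induction l with
  | nil => simp [pvZnext]
  | cons a t ih =>
    cases t with
    | nil => simp [pvZnext]
    | cons b u => simp only [pvZnext, List.length_cons] at *; omega

theorem pvZnext_append_singleton (l : List Int) (a : Int) :
    pvZnext (l ++ [a]) =
      (if a ≠ 0 then (pvZnext l).set (l.length - 1) 0 else pvZnext l) ++ [a] := by
  induction l with
  | nil => simp [pvZnext]
  | cons c t ih =>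
    cases t with
    | nil => simp [pvZnext]; split <;> simp
    | cons d u =>
      simp only [List.cons_append, pvZnext]
      rw [show d :: (u ++ [a]) = (d :: u) ++ [a] from rfl, ih]
      by_cases ha : a = 0 <;> simp [ha, List.length_cons, List.set_cons_succ]

theorem pvA_baLoop_eq (s : List Char) :
    ∀ k j i (ba : List Int), s.length - j = k → 1 ≤ j → ba.length = s.length →
      ba.drop j = List.replicate (s.length - j) 0 →
      pvA_baLoop s i j ba = ba.take j ++ pvNaive s i j (ba.getD (j - 1) 0) := by
  intro k
  induction k with
  | zero =>
    intro j i ba hk hj hlen hdrop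
    rw [pvA_baLoop, pvNaive]
    simp only [if_neg (by omega : ¬ j < s.length)]
    rw [List.take_of_length_le (by omega), List.append_nil]
  | succ k ih =>
    intro j i ba hk hj hlen hdrop
    have hjlt : j < s.length := by omega
    have hjba : j < ba.length := by omega
    have hbaj : ba.getD j 0 = 0 := by
      have h : ba[j]? = (ba.drop j)[0]? := by simp [List.getElem?_drop]
      rw [List.getD_eq_getElem?_getD, h, hdrop]
      have hpos : 0 < s.length - j := by omega
      simp [hpos]
    rw [pvA_baLoop, pvNaive]
    simp only [if_pos hjlt]
    by_cases hc : s.getD i ' ' = s.getD j ' '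
    · simp only [if_pos hc]
      set v : Int := ba.getD (j - 1) 0 + 1 with hv
      have hset : (ba.set j v).length = s.length := by simp [hlen]
      have hsetdrop : (ba.set j v).drop (j + 1) = List.replicate (s.length - (j + 1)) 0 := by
        have h1 : (ba.set j v).drop (j + 1) = ba.drop (j + 1) := by
          rw [List.drop_set, if_pos (by omega)]
        have h2 : ba.drop (j + 1) = (ba.drop j).drop 1 := by
          rw [List.drop_drop]
        rw [h1, h2, hdrop, List.drop_replicate,
          show s.length - j - 1 = s.length - (j + 1) from by omega]
      have hgd : (ba.set j v).getD ((j + 1) - 1) 0 = v := by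
        simp only [Nat.add_sub_cancel, List.getD_eq_getElem?_getD, List.getElem?_set_self hjba]
        simp
      have htake : (ba.set j v).take (j + 1) = ba.take j ++ [v] := by
        rw [List.take_add_one, List.take_set,
          List.set_eq_of_length_le (by rw [List.length_take]; omega),
          List.getElem?_set_self hjba]
        rfl
      rw [ih (j + 1) (i + 1) (ba.set j v) (by omega) (by omega) hset hsetdrop, hgd, htake]
      simp
    · simp only [if_neg hc]
      have hdrop' : ba.drop (j + 1) = List.replicate (s.length - (j + 1)) 0 := by
        rw [← List.drop_drop, hdrop, List.drop_replicate,
          show s.length - j - 1 = s.length - (j + 1) from by omega]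
      have hj0 : ba[j] = 0 := by
        have := hbaj
        rwa [List.getD_eq_getElem?_getD, List.getElem?_eq_getElem hjba, Option.getD_some] at this
      have htake : ba.take (j + 1) = ba.take j ++ [(0 : Int)] := by
        rw [List.take_add_one, List.getElem?_eq_getElem hjba, hj0]
        rfl
      have hgd : ba.getD ((j + 1) - 1) 0 = 0 := by simpa using hbaj
      rw [ih (j + 1) 0 ba (by omega) (by omega) hlen hdrop', hgd, htake]
      simp

theorem pvA_strict_eq (ba : List Int) :
    ∀ m, m ≤ ba.length →
      (List.range m).foldl pvA_strictStep ba = pvZnext (ba.take m) ++ ba.drop m := by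
  intro m
  induction m with
  | zero => simp [pvZnext]
  | succ m ih =>
    intro hm
    have hmlt : m < ba.length := by omega
    rw [List.range_succ, List.foldl_append, ih (by omega)]
    have hlenL : (pvZnext (ba.take m)).length = m := by
      rw [pvZnext_length, List.length_take]; omega
    have hdropm : ba.drop m = ba[m] :: ba.drop (m + 1) := by
      rw [List.drop_eq_getElem_cons hmlt]
    have htake : ba.take (m + 1) = ba.take m ++ [ba[m]] := by
      rw [List.take_add_one, List.getElem?_eq_getElem hmlt]; rfl
    rw [List.foldl_cons, List.foldl_nil]
    unfold pvA_strictStep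
    by_cases hm0 : m = 0
    · subst hm0
      simp only [reduceIte]
      rw [htake, hdropm]
      simp [pvZnext]
    · rw [if_neg hm0]
      have hget : (pvZnext (ba.take m) ++ ba.drop m).getD m 0 = ba[m] := by
        rw [hdropm, List.getD_eq_getElem?_getD, List.getElem?_append_right (by omega)]
        simp [hlenL, List.getElem?_eq_getElem hmlt]
      rw [hget, htake, pvZnext_append_singleton]
      have hlt : (ba.take m).length = m := by rw [List.length_take]; omega
      by_cases hz : ba[m] ≠ 0
      · rw [if_pos hz, if_pos hz]
        rw [List.set_append, if_pos (by omega), hdropm]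
        simp [hlt]
      · rw [if_neg hz, if_neg hz, hdropm]
        simp

theorem pvB_loop_eq (s : List Char) :
    ∀ k j i (prev : Int) (t : List Int), s.length - j = k → 0 ≤ prev →
      pvB_loop s i j (t ++ [prev]) = t ++ pvZnext (prev :: pvNaive s i j prev) := by
  intro k
  induction k with
  | zero =>
    intro j i prev t hk hp
    rw [pvB_loop, pvNaive]
    simp [if_neg (by omega : ¬ j < s.length), pvZnext]
  | succ k ih =>
    intro j i prev t hk hp
    have hjlt : j < s.length := by omega
    rw [pvB_loop, pvNaive]
    simp only [if_pos hjlt]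
    by_cases hc : s.getD i ' ' = s.getD j ' '
    · simp only [if_pos hc]
      have hset : (t ++ [prev]).set ((t ++ [prev]).length - 1) 0 = t ++ [(0 : Int)] := by
        have hl : (t ++ [prev]).length - 1 = t.length := by simp
        rw [hl, List.set_append, if_neg (by omega)]
        simp
      have hlast : (t ++ [prev]).getLastD 0 = prev := by simp
      rw [hset, hlast]
      rw [ih (j + 1) (i + 1) (prev + 1) (t ++ [0]) (by omega) (by omega)]
      rw [List.append_assoc]
      congr 1
      show [(0 : Int)] ++ pvZnext ((prev + 1) :: pvNaive s (i + 1) (j + 1) (prev + 1)) =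
        pvZnext (prev :: (prev + 1) :: pvNaive s (i + 1) (j + 1) (prev + 1))
      rw [show pvZnext (prev :: (prev + 1) :: pvNaive s (i + 1) (j + 1) (prev + 1)) =
        (if prev + 1 ≠ 0 then 0 else prev) :: pvZnext ((prev + 1) :: pvNaive s (i + 1) (j + 1) (prev + 1)) from rfl]
      rw [if_pos (by omega : prev + 1 ≠ 0)]
      rfl
    · simp only [if_neg hc]
      rw [ih (j + 1) 0 0 (t ++ [prev]) (by omega) (by omega)]
      rw [List.append_assoc]
      congr 1

-- ===== VERDICT (by name: the statement is the Claim_ definition above) =====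
theorem strict_border_array_spec : Claim_equal_strict_border_array := by
  intro x _
  unfold Spec_strict_border_array strict_border_array strict_border_array_alt pvA_border_array
  set s := x.toList with hs
  by_cases hn : s.isEmpty
  · have h0 : s.length = 0 := by simpa [List.isEmpty_iff_length_eq_zero] using hn
    rw [if_pos hn]
    rw [pvA_baLoop, pvB_loop]
    simp [h0]
  · rw [if_neg hn]
    have h1 : 1 ≤ s.length := by
      rcases Nat.eq_zero_or_pos s.length with h | h
      · exact absurd (by simpa [List.isEmpty_iff_length_eq_zero] using h) hn
      · omega
    have hA : pvA_baLoop s 0 1 (List.replicate s.length 0) = (0 : Int) :: pvNaive s 0 1 0 := by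
      rw [pvA_baLoop_eq s (s.length - 1) 1 0 (List.replicate s.length 0) (by omega) (by omega)
        (by simp) (by simp)]
      have h2 : (List.replicate s.length (0 : Int)).take 1 = [0] := by
        rw [List.take_replicate, show min 1 s.length = 1 from by omega]
        rfl
      have h3 : (List.replicate s.length (0 : Int)).getD 0 0 = 0 := by
        rw [List.getD_eq_getElem?_getD, List.getElem?_replicate, if_pos (by omega)]
        rfl
      rw [h2, h3]; rfl
    rw [hA]
    have hB : pvB_loop s 0 1 [0] = pvZnext ((0 : Int) :: pvNaive s 0 1 0) := by
      have := pvB_loop_eq s (s.length - 1) 1 0 0 [] (by omega) (by omega)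
      simpa using this
    rw [hB]
    set L : List Int := (0 : Int) :: pvNaive s 0 1 0 with hL
    rw [pvA_strict_eq L L.length (le_refl _)]
    simp
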